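-- pv_equiv track=rewrite | github.com/pathhenry/evidence-pdf-processor-web | evidence_pdf_converter.py | split_text_units
-- ===== SOURCE A (Python) =====
-- from typing import List, Tuple, Union
--
-- def split_text_units(text: str) -> List[str]:
--     """
--     將文字分割成顯示單元，連續數字視為一個單元
--     例如："被上證15" → ["被", "上", "證", "15"]
--     """
--     units = []
--     current_number = ""
--
--     for char in text:
--         if char.isdigit():
--             current_number += char
--         else:
--             if current_number:
--                 units.append(current_number)
--                 current_number = ""
--             units.append(char)
--
--     # 處理結尾的數字
--     if current_number:
--         units.append(current_number)
--
--     return units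
-- ===== SOURCE B (Python) =====
-- from itertools import groupby
-- from typing import List
--
--
-- def split_text_units(text: str) -> List[str]:
--     units: List[str] = []
--     for is_digit, group in groupby(text, key=str.isdigit):
--         if is_digit:
--             units.append(''.join(group))
--         else:
--             units.extend(group)
--     return units
-- ===== Notes on version B (the rewrite author's own statement) =====
-- stated objective: idiomatic
-- what changed: Replaces the manual accumulator-and-flush loop with itertools.groupby keyed on str.isdigit: the text is partitioned into maximal runs first and each run is emitted whole (joined if digits, one unit per char otherwise).
import Mathlib
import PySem

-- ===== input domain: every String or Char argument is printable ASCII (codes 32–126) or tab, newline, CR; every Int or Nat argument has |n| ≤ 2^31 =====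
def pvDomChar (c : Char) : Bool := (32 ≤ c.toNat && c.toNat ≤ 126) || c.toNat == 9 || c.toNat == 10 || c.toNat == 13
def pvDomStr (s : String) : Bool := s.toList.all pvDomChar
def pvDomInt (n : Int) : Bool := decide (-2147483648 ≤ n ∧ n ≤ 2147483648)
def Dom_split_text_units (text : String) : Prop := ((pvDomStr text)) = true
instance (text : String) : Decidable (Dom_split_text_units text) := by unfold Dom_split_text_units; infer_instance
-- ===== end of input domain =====

-- B replaces A's manual accumulate-and-flush loop with an itertools.groupby run
-- decomposition (idiomatic, same O(n) cost); return values proved equal on all inputs.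


-- ===== PORT A =====
-- the for-loop with state (units, current_number); current_number kept as List Char,
-- turned into a String exactly where Python appends it
def splitA_loop : List Char → List String → List Char → List String
  | [], units, cur => if cur ≠ [] then units ++ [String.ofList cur] else units
  | c :: rest, units, cur =>
    if PySem.Chars.isdigit c then
      splitA_loop rest units (cur ++ [c])
    else
      splitA_loop rest
        ((if cur ≠ [] then units ++ [String.ofList cur] else units) ++ [String.ofList [c]]) []

def split_text_units (text : String) : List String :=
  splitA_loop text.toList [] []

-- ===== PORT B =====
-- itertools.groupby(text, key=str.isdigit): maximal runs of characters with equal isdigit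
def pvRuns : List Char → List (List Char)
  | [] => []
  | c :: rest =>
    (c :: rest.takeWhile (fun x => PySem.Chars.isdigit x == PySem.Chars.isdigit c)) ::
      pvRuns (rest.dropWhile (fun x => PySem.Chars.isdigit x == PySem.Chars.isdigit c))
termination_by cs => cs.length
decreasing_by
  simpa using Nat.lt_succ_of_le
    (List.length_dropWhile_le (fun x => PySem.Chars.isdigit x == PySem.Chars.isdigit c) rest)

-- for each run: a digit run is joined into one unit, a non-digit run extends unit-per-char
def split_text_units_alt (text : String) : List String :=
  (pvRuns text.toList).flatMap fun g =>
    match g with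
    | [] => []
    | c :: _ =>
      if PySem.Chars.isdigit c then [String.ofList g] else g.map (fun x => String.ofList [x])

-- ===== PRECONDITION & SPEC =====
def Spec_split_text_units (text : String) (out : List String) : Prop := out = split_text_units_alt text
instance (text : String) (out : List String) : Decidable (Spec_split_text_units text out) := by unfold Spec_split_text_units; infer_instance

-- ===== CLAIM (what is proved, stated in full; the proofs are below) =====
def Claim_equal_split_text_units : Prop := ∀ (text : String), Dom_split_text_units text → Spec_split_text_units text (split_text_units text)

-- ===== LEMMAS AND PROOFS =====

-- B's core on a character list
def altGo (cs : List Char) : List String :=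
  (pvRuns cs).flatMap fun g =>
    match g with
    | [] => []
    | c :: _ =>
      if PySem.Chars.isdigit c then [String.ofList g] else g.map (fun x => String.ofList [x])

theorem altGo_nil : altGo [] = [] := by simp [altGo, pvRuns]

theorem altGo_cons (c : Char) (rest : List Char) :
    altGo (c :: rest) =
      (if PySem.Chars.isdigit c then
          [String.ofList (c :: rest.takeWhile (fun x => PySem.Chars.isdigit x == PySem.Chars.isdigit c))]
        else
          (c :: rest.takeWhile (fun x => PySem.Chars.isdigit x == PySem.Chars.isdigit c)).map
            (fun x => String.ofList [x])) ++
        altGo (rest.dropWhile (fun x => PySem.Chars.isdigit x == PySem.Chars.isdigit c)) := by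
  rw [altGo, pvRuns]
  by_cases h : PySem.Chars.isdigit c <;> simp [h, altGo]

-- the A-loop's units accumulator only ever receives appends
theorem splitA_loop_acc (cs : List Char) :
    ∀ (units : List String) (cur : List Char),
      splitA_loop cs units cur = units ++ splitA_loop cs [] cur := by
  induction cs with
  | nil =>
    intro units cur
    simp only [splitA_loop]
    by_cases h : cur = [] <;> simp [h]
  | cons c rest ih =>
    intro units cur
    simp only [splitA_loop]
    by_cases hd : PySem.Chars.isdigit c
    · simp only [hd, if_true]
      exact ih units (cur ++ [c])
    · simp only [hd, Bool.false_eq_true, if_false]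
      rw [ih ((if cur ≠ [] then units ++ [String.ofList cur] else units) ++ [String.ofList [c]]) [],
        ih ((if cur ≠ [] then ([] : List String) ++ [String.ofList cur] else []) ++ [String.ofList [c]]) []]
      by_cases h : cur = [] <;> simp [h]

-- peeling one non-digit char off B
theorem altGo_nondigit (c : Char) (rest : List Char) (hd : PySem.Chars.isdigit c = false) :
    altGo (c :: rest) = String.ofList [c] :: altGo rest := by
  rw [altGo_cons, hd]
  cases rest with
  | nil => simp [altGo_nil]
  | cons c' rest' =>
    by_cases hd' : PySem.Chars.isdigit c'
    · simp [hd']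
    · have hd'' : PySem.Chars.isdigit c' = false := by simpa using hd'
      have hpred : (fun x => PySem.Chars.isdigit x == PySem.Chars.isdigit c)
          = (fun x => PySem.Chars.isdigit x == PySem.Chars.isdigit c') := by
        funext x; rw [hd, hd'']
      rw [altGo_cons, hd'']
      simp only [List.takeWhile_cons, List.dropWhile_cons, hd'']
      simp

-- main invariant: the pending digit accumulator is the prefix of the first run
theorem splitA_loop_eq_altGo (cs : List Char) :
    ∀ cur : List Char, (∀ c ∈ cur, PySem.Chars.isdigit c = true) →
      splitA_loop cs [] cur = altGo (cur ++ cs) := by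
  induction cs with
  | nil =>
    intro cur hcur
    cases cur with
    | nil => simp [splitA_loop, altGo_nil]
    | cons c0 cur' =>
      have h0 : PySem.Chars.isdigit c0 = true := hcur c0 (by simp)
      have htw : cur'.takeWhile
          (fun x => PySem.Chars.isdigit x == PySem.Chars.isdigit c0) = cur' :=
        List.takeWhile_eq_self_iff.mpr (by intro x hx; simp [hcur x (by simp [hx]), h0])
      have hdw : cur'.dropWhile
          (fun x => PySem.Chars.isdigit x == PySem.Chars.isdigit c0) = [] :=
        List.dropWhile_eq_nil_iff.mpr (by intro x hx; simp [hcur x (by simp [hx]), h0])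
      rw [List.append_nil, altGo_cons, htw, hdw, h0, altGo_nil]
      simp [splitA_loop]
  | cons c rest ih =>
    intro cur hcur
    by_cases hd : PySem.Chars.isdigit c
    · rw [splitA_loop]
      simp only [hd, if_true]
      rw [ih (cur ++ [c]) (by
        intro x hx
        rcases List.mem_append.mp hx with h | h
        · exact hcur x h
        · simp at h; simpa [h] using hd)]
      simp
    · have hd' : PySem.Chars.isdigit c = false := by simpa using hd
      rw [splitA_loop]
      simp only [hd', Bool.false_eq_true, if_false]
      rw [splitA_loop_acc, ih [] (by simp)]
      cases cur with
      | nil => simp [altGo_nondigit c rest hd']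
      | cons c0 cur' =>
        have h0 : PySem.Chars.isdigit c0 = true := hcur c0 (by simp)
        have htw : cur'.takeWhile
            (fun x => PySem.Chars.isdigit x == PySem.Chars.isdigit c0) = cur' :=
          List.takeWhile_eq_self_iff.mpr (by intro x hx; simp [hcur x (by simp [hx]), h0])
        have hdw : cur'.dropWhile
            (fun x => PySem.Chars.isdigit x == PySem.Chars.isdigit c0) = [] :=
          List.dropWhile_eq_nil_iff.mpr (by intro x hx; simp [hcur x (by simp [hx]), h0])
        have hPc : (PySem.Chars.isdigit c == PySem.Chars.isdigit c0) = false := by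
          rw [hd', h0]; rfl
        have htw2 : (cur' ++ c :: rest).takeWhile
            (fun x => PySem.Chars.isdigit x == PySem.Chars.isdigit c0) = cur' := by
          rw [List.takeWhile_append, htw, if_pos rfl, List.takeWhile_cons, hPc]
          simp
        have hdw2 : (cur' ++ c :: rest).dropWhile
            (fun x => PySem.Chars.isdigit x == PySem.Chars.isdigit c0) = c :: rest := by
          rw [List.dropWhile_append, hdw]
          simp [hPc]
        rw [show ((c0 :: cur') ++ c :: rest) = c0 :: (cur' ++ c :: rest) by simp,
          altGo_cons, htw2, hdw2, h0, altGo_nondigit c rest hd']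
        simp

-- ===== VERDICT (by name: the statement is the Claim_ definition above) =====
theorem split_text_units_spec : Claim_equal_split_text_units := by
  intro text _
  unfold Spec_split_text_units split_text_units split_text_units_alt
  have := splitA_loop_eq_altGo text.toList [] (by simp)
  simpa [altGo] using this
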